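-- pv_equiv track=rewrite | github.com/yash-ganatra/Banking-knowledgeAssistance | utils/clean_code_snippets.py | clean_code_snippet
-- ===== SOURCE A (Python) =====
-- def clean_code_snippet(code):
--     """
--     Clean a code snippet by:
--     1. Removing excessive trailing whitespace
--     2. Normalizing line endings
--     3. Removing trailing tabs/spaces from each line
--     4. Limiting consecutive blank lines to 2
--     """
--     if not code:
--         return code
--
--     # Split into lines
--     lines = code.split('\n')
--
--     # Remove trailing whitespace from each line
--     lines = [line.rstrip() for line in lines]
--
--     # Remove excessive blank lines at the end
--     while lines and not lines[-1]:
--         lines.pop()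
--
--     # Limit consecutive blank lines to 2
--     cleaned_lines = []
--     blank_count = 0
--
--     for line in lines:
--         if not line.strip():
--             blank_count += 1
--             if blank_count <= 2:
--                 cleaned_lines.append(line)
--         else:
--             blank_count = 0
--             cleaned_lines.append(line)
--
--     return '\n'.join(cleaned_lines)
-- ===== SOURCE B (Python) =====
-- def clean_code_snippet(code):
--     if not code:
--         return code
--     lines = [line.rstrip() for line in code.split('\n')]
--     while lines and not lines[-1]:
--         lines.pop()
--     # Run-based pass: copy non-blank lines; for each run of blank lines emit at most 2.
--     out = []
--     i = 0
--     n = len(lines)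
--     while i < n:
--         if lines[i]:
--             out.append(lines[i])
--             i += 1
--         else:
--             j = i
--             while j < n and not lines[j]:
--                 j += 1
--             out.extend([''] * min(j - i, 2))
--             i = j
--     return '\n'.join(out)
-- ===== Notes on version B (the rewrite author's own statement) =====
-- stated objective: alternative
-- what changed: Replaced A's running blank_count state machine by a run-based pass: scan each maximal run of blank lines at once and emit min(run,2) empty lines, copying non-blank lines unchanged.
import Mathlib
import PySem

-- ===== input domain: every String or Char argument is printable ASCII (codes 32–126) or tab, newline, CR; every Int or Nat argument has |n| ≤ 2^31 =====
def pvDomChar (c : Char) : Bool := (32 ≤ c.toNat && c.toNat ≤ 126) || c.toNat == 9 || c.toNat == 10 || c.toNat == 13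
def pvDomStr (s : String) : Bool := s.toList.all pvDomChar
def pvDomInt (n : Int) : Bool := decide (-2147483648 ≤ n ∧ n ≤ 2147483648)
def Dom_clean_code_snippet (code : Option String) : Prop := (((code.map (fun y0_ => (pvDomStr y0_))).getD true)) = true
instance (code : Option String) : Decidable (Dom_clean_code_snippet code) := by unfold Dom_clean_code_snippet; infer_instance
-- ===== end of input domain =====

-- B replaces A's running blank_count state machine by a run-based pass (whole runs of
-- blank lines handled at once, emitting min(run, 2) blanks); same cost, different decomposition.


-- ===== PORT A =====
-- 'while lines and not lines[-1]: lines.pop()' (identical loop in both Python sources, shared)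
def pvDropBlankTail (xs : List String) : List String :=
  match _h : xs.getLast? with
  | none => xs
  | some l =>
    if l = "" then pvDropBlankTail xs.dropLast else xs
termination_by xs.length
decreasing_by
  cases xs with
  | nil => simp at _h
  | cons a t => simp [List.length_dropLast]

-- A's loop body: blank_count update and conditional append
def pvStepA (st : Nat × List String) (line : String) : Nat × List String :=
  if PySem.Str.strip line = "" then
    (st.1 + 1, if st.1 + 1 ≤ 2 then st.2 ++ [line] else st.2)
  else (0, st.2 ++ [line])

def clean_code_snippet (code : Option String) : Option String :=
  match code with
  | none => none
  | some s =>
    if s = "" then some s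
    else
      let lines0 := ((PySem.Str.split? s "\n").getD []).map PySem.Str.rstrip
      let lines := pvDropBlankTail lines0
      let res := lines.foldl pvStepA (0, ([] : List String))
      some (PySem.Str.join "\n" res.2)

-- ===== PORT B =====
-- run-based pass of Source B: non-blank lines copied one by one; a maximal run of j-i blank
-- lines consumed at once, contributing min(j-i, 2) empty lines
def pvRuns : List String → List String
  | [] => []
  | l :: rest =>
    if l = "" then
      List.replicate (min ((l :: rest).takeWhile (· == "")).length 2) ""
        ++ pvRuns ((l :: rest).dropWhile (· == ""))
    else l :: pvRuns rest
termination_by xs => xs.length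
decreasing_by
  · simp only [List.dropWhile_cons]
    split
    · have := List.length_dropWhile_le (· == "") rest
      simp only [List.length_cons]
      omega
    · simp_all
  · simp

def clean_code_snippet_alt (code : Option String) : Option String :=
  match code with
  | none => none
  | some s =>
    if s = "" then some s
    else
      let lines0 := ((PySem.Str.split? s "\n").getD []).map PySem.Str.rstrip
      let lines := pvDropBlankTail lines0
      some (PySem.Str.join "\n" (pvRuns lines))

-- ===== PRECONDITION & SPEC =====
def Spec_clean_code_snippet (code : Option String) (out : Option String) : Prop := out = clean_code_snippet_alt code
instance (code : Option String) (out : Option String) : Decidable (Spec_clean_code_snippet code out) := by unfold Spec_clean_code_snippet; infer_instance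

-- ===== CLAIM (what is proved, stated in full; the proofs are below) =====
def Claim_equal_clean_code_snippet : Prop := ∀ (code : Option String), Dom_clean_code_snippet code → Spec_clean_code_snippet code (clean_code_snippet code)

-- ===== LEMMAS AND PROOFS =====

lemma pvStrip_empty : PySem.Str.strip "" = "" := by decide

-- A's loop across a block of k blank lines, from blank counter b
lemma pvRunFold (k : Nat) : ∀ (b : Nat) (acc rest' : List String),
    List.foldl pvStepA (b, acc) (List.replicate k "" ++ rest')
      = List.foldl pvStepA (b + k, acc ++ List.replicate (min k (2 - min b 2)) "") rest' := by
  induction k with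
  | zero => intro b acc rest'; simp
  | succ k ih =>
    intro b acc rest'
    rw [List.replicate_succ, List.cons_append, List.foldl_cons]
    have hstep : pvStepA (b, acc) "" = (b + 1, if b + 1 ≤ 2 then acc ++ [""] else acc) := by
      simp [pvStepA, pvStrip_empty]
    rw [hstep]
    split
    · rename_i hb
      rw [ih]
      rcases Nat.lt_or_ge b 1 with hb0 | hb1
      · have hb0' : b = 0 := by omega
        subst hb0'
        have h1 : min (k + 1) (2 - min 0 2) = min k (2 - min (0 + 1) 2) + 1 := by omega
        rw [h1, List.replicate_succ, List.append_assoc]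
        have e : (0 : Nat) + 1 + k = 0 + (k + 1) := by omega
        rw [e]
        simp
      · have hb1' : b = 1 := by omega
        subst hb1'
        have h1 : min (k + 1) (2 - min 1 2) = min k (2 - min (1 + 1) 2) + 1 := by omega
        rw [h1, List.replicate_succ, List.append_assoc]
        have e : (1 : Nat) + 1 + k = 1 + (k + 1) := by omega
        rw [e]
        simp
    · rename_i hb
      rw [ih]
      have h1 : min (k + 1) (2 - min b 2) = min k (2 - min (b + 1) 2) := by omega
      rw [h1]
      have e : b + 1 + k = b + (k + 1) := by omega
      rw [e]

-- main loop equivalence: A's counter loop equals B's run-based pass, provided every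
-- element satisfies 'strip l = "" ↔ l = ""' (true of rstripped lines)
lemma pvLoopEq : ∀ (n : Nat) (xs : List String), xs.length ≤ n →
    (∀ l ∈ xs, PySem.Str.strip l = "" ↔ l = "") → ∀ acc,
    (List.foldl pvStepA (0, acc) xs).2 = acc ++ pvRuns xs := by
  intro n
  induction n with
  | zero =>
    intro xs hlen _ acc
    have : xs = [] := List.eq_nil_of_length_eq_zero (by omega)
    subst this; simp [pvRuns]
  | succ n ih =>
    intro xs hlen hmem acc
    cases xs with
    | nil => simp [pvRuns]
    | cons l rest =>
      by_cases hl : l = ""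
      · subst hl
        set T := ("" :: rest).takeWhile (· == "") with hT
        set D := ("" :: rest).dropWhile (· == "") with hD
        have hsplit : ("" :: rest) = T ++ D := (List.takeWhile_append_dropWhile).symm
        have hTrep : T = List.replicate T.length "" := by
          apply List.eq_replicate_of_mem
          intro b hb
          have := List.mem_takeWhile_imp hb
          simpa using this
        have hTlen : 1 ≤ T.length := by
          rw [hT]; simp
        have hRuns : pvRuns ("" :: rest) = List.replicate (min T.length 2) "" ++ pvRuns D := by
          rw [pvRuns, if_pos rfl, ← hT, ← hD]
        rw [hRuns, hsplit]
        rw [hTrep]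
        rw [pvRunFold]
        have hmin : min T.length (2 - min 0 2) = min T.length 2 := by omega
        rw [hmin]
        cases hDc : D with
        | nil => simp [pvRuns]
        | cons m t =>
          have hmfalse : (m == "") = false := by
            have hne : ("" :: rest).dropWhile (· == "") ≠ [] := by
              rw [← hD, hDc]; simp
            have h2 := List.head_dropWhile_not (· == "") (l := ("" :: rest)) hne
            have heq : ("" :: rest).dropWhile (· == "") = m :: t := by rw [← hD, hDc]
            simp only [heq, List.head_cons] at h2
            exact h2
          have hm : m ≠ "" := by simpa using hmfalse
          have hmmem : m ∈ ("" :: rest) := by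
            rw [hsplit, hDc]; exact List.mem_append_right _ (by simp)
          have hmstrip : ¬ PySem.Str.strip m = "" := by
            intro hc
            exact hm ((hmem m hmmem).mp hc)
          rw [List.foldl_cons]
          have hstep : pvStepA (0 + T.length, acc ++ List.replicate (min T.length 2) "") m
              = (0, (acc ++ List.replicate (min T.length 2) "") ++ [m]) := by
            simp [pvStepA, hmstrip]
          rw [hstep]
          have htlen : t.length ≤ n := by
            have h1 : ("" :: rest).length = T.length + D.length := by
              rw [hsplit]; simp
            rw [hDc] at h1
            simp at h1 hlen
            omega
          have htmem : ∀ l ∈ t, PySem.Str.strip l = "" ↔ l = "" := by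
            intro l hlmem
            apply hmem
            rw [hsplit, hDc]
            exact List.mem_append_right _ (by simp [hlmem])
          rw [ih t htlen htmem]
          have hRc : pvRuns (m :: t) = m :: pvRuns t := by
            rw [pvRuns]; simp [hm]
          simp [hRc]
      · have hlstrip : ¬ PySem.Str.strip l = "" := by
          intro hc
          exact hl ((hmem l (by simp)).mp hc)
        rw [List.foldl_cons]
        have hstep : pvStepA (0, acc) l = (0, acc ++ [l]) := by
          simp [pvStepA, hlstrip]
        rw [hstep]
        have : rest.length ≤ n := by simp at hlen; omega
        rw [ih rest this (fun x hx => hmem x (by simp [hx])) (acc ++ [l])]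
        have : pvRuns (l :: rest) = l :: pvRuns rest := by
          rw [pvRuns]; simp [hl]
        rw [this]
        simp

-- strip of an rstripped string is empty iff the rstripped string is empty
lemma pvCharsRstrip_nil_iff (cs : List Char) :
    PySem.Chars.rstrip cs = [] ↔ ∀ c ∈ cs, PySem.Chars.isspace c := by
  simp [PySem.Chars.rstrip, List.dropWhile_eq_nil_iff]

lemma pvStripRstrip (s : String) :
    PySem.Str.strip (PySem.Str.rstrip s) = "" ↔ PySem.Str.rstrip s = "" := by
  have hnil : ∀ (t : String), t = "" ↔ t.toList = [] := by
    intro t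
    constructor
    · intro h; simp [h]
    · intro h; exact String.toList_inj.mp (by simpa using h)
  rw [hnil, hnil (PySem.Str.rstrip s)]
  rw [PySem.Str.toList_strip, PySem.Str.toList_rstrip]
  set r := PySem.Chars.rstrip s.toList with hr
  constructor
  · intro h
    -- strip r = rstrip (lstrip r) = [] means every char of r is whitespace
    have hall : ∀ c ∈ PySem.Chars.lstrip r, PySem.Chars.isspace c := by
      rw [PySem.Chars.strip] at h
      exact (pvCharsRstrip_nil_iff _).mp h
    have hallr : ∀ c ∈ r, PySem.Chars.isspace c := by
      intro c hc
      rcases List.mem_append.mp (by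
          rw [List.takeWhile_append_dropWhile (p := PySem.Chars.isspace) (l := r)]
          exact hc : c ∈ r.takeWhile PySem.Chars.isspace ++ r.dropWhile PySem.Chars.isspace) with h1 | h2
      · exact List.mem_takeWhile_imp h1
      · exact hall c h2
    -- but r = rstrip cs: if r ≠ [], its last char is not whitespace
    by_contra hne
    have hrev : r.reverse = List.dropWhile PySem.Chars.isspace s.toList.reverse := by
      rw [hr, PySem.Chars.rstrip, List.reverse_reverse]
    cases hrevc : r.reverse with
    | nil => exact hne (by simpa using List.reverse_eq_nil_iff.mp hrevc)
    | cons a u =>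
      have ha : PySem.Chars.isspace a = false := by
        have hne' : List.dropWhile PySem.Chars.isspace s.toList.reverse ≠ [] := by
          rw [← hrev, hrevc]; simp
        have h3 := List.head_dropWhile_not PySem.Chars.isspace (l := s.toList.reverse) hne'
        have heq : List.dropWhile PySem.Chars.isspace s.toList.reverse = a :: u := by
          rw [← hrev]; exact hrevc
        simp only [heq, List.head_cons] at h3
        exact h3
      have hamem : a ∈ r := by
        have : a ∈ r.reverse := by rw [hrevc]; simp
        simpa using this
      have := hallr a hamem
      rw [ha] at this
      exact absurd this (by simp)
  · intro h
    rw [h]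
    simp [PySem.Chars.strip, PySem.Chars.lstrip, PySem.Chars.rstrip]

-- elements survive the trailing-blank pop
lemma pvDropBlankTail_sublist (xs : List String) : (pvDropBlankTail xs).Sublist xs := by
  fun_induction pvDropBlankTail with
  | case1 x y => exact List.Sublist.refl _
  | case2 x y ih => exact ih.trans (List.dropLast_sublist _)
  | case3 x y z => exact List.Sublist.refl _

-- ===== VERDICT (by name: the statement is the Claim_ definition above) =====
theorem clean_code_snippet_spec : Claim_equal_clean_code_snippet := by
  intro code _
  unfold Spec_clean_code_snippet clean_code_snippet clean_code_snippet_alt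
  cases code with
  | none => rfl
  | some s =>
    by_cases hs : s = ""
    · simp [hs]
    · simp only [hs, if_false]
      congr 1
      congr 1
      set lines0 := ((PySem.Str.split? s "\n").getD []).map PySem.Str.rstrip with hlines0
      set lines := pvDropBlankTail lines0 with hlines
      have hmem : ∀ l ∈ lines, PySem.Str.strip l = "" ↔ l = "" := by
        intro l hl
        have hl0 : l ∈ lines0 := (pvDropBlankTail_sublist lines0).mem hl
        rw [hlines0] at hl0
        rcases List.mem_map.mp hl0 with ⟨t, _, rfl⟩
        exact pvStripRstrip t
      have := pvLoopEq lines.length lines (le_refl _) hmem []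
      simpa using this
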